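-- pv_equiv track=rewrite | github.com/RohanKapri/DEAD-EAGLE-999 | solutions/python/crypto-square/1/crypto_square.py | cipher_text
-- ===== SOURCE A (Python) =====
-- import math
-- import string
-- import textwrap
--
-- VALID = string.ascii_lowercase + string.digits
--
-- def cipher_text(plain_text: str) -> str:
--     data = ''.join(ch for ch in plain_text.lower() if ch in VALID)
--     ln = len(data)
--     col = math.ceil(math.sqrt(ln)) or 1
--     row = col - 1 + int(col * (col - 1) < ln)
--     data = data.ljust(col * row)
--     encoded = ''.join(data[i + j * col] for i in range(col) for j in range(row))
--     return ' '.join(textwrap.wrap(encoded, row or 1, drop_whitespace=False))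
-- ===== SOURCE B (Python) =====
-- import math
-- import string
--
-- VALID = string.ascii_lowercase + string.digits
--
-- def cipher_text(plain_text: str) -> str:
--     data = ''.join(ch for ch in plain_text.lower() if ch in VALID)
--     ln = len(data)
--     col = math.ceil(math.sqrt(ln)) or 1
--     row = col - 1 + (col * (col - 1) < ln)
--     data = data.ljust(col * row)
--     rows = [data[k * col:(k + 1) * col] for k in range(row)]
--     return ' '.join(''.join(r[i] for r in rows) for i in range(col))
-- ===== Notes on version B (the rewrite author's own statement) =====
-- stated objective: idiomatic
-- what changed: B builds the grid as explicit row slices and joins each column by reading it across the rows, instead of A's flat index arithmetic (data[i+j*col]) into one padded string followed by re-chunking the flat ciphertext with textwrap.wrap.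
import Mathlib
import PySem

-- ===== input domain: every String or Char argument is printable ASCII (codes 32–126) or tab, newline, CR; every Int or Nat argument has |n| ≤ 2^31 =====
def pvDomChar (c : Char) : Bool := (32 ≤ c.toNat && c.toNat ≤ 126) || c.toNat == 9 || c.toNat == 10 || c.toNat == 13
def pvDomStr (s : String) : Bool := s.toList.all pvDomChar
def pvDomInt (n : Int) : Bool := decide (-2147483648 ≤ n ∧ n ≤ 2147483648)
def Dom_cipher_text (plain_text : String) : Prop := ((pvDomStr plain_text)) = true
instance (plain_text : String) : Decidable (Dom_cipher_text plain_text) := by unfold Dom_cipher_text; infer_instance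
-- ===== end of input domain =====

-- B reads the ciphertext from an explicit row-sliced grid, column by column, instead of A's
-- flat index arithmetic into one padded string followed by re-chunking with textwrap.wrap (idiomatic).

-- VALID = string.ascii_lowercase + string.digits
def pvVALID : List Char := "abcdefghijklmnopqrstuvwxyz0123456789".toList

-- Shared first lines of both Pythons (identical source text in A and B):
-- data = ''.join(ch for ch in plain_text.lower() if ch in VALID)
-- ('ch in VALID' for a single character ch is exactly membership of ch in VALID)
def pvData (plain_text : String) : List Char :=
  (PySem.Chars.lower plain_text.toList).filter (fun ch => pvVALID.contains ch)

-- math.ceil(math.sqrt(ln)) — hand port of the float ceil-sqrt as the integer ceiling square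
-- root; exact for every length reachable here (double sqrt/ceil are exact far beyond these sizes)
def pvCeil (ln : Nat) : Nat :=
  if Nat.sqrt ln * Nat.sqrt ln = ln then Nat.sqrt ln else Nat.sqrt ln + 1

-- col = … or 1  ('or 1' turns the falsy 0 into 1)
def pvCol (ln : Nat) : Nat := if pvCeil ln = 0 then 1 else pvCeil ln

-- row = col - 1 + int(col * (col - 1) < ln)  (col ≥ 1, so Nat subtraction is exact)
def pvRow (col ln : Nat) : Nat := col - 1 + (if col * (col - 1) < ln then 1 else 0)

-- data.ljust(w): pad on the right with spaces to width w (Nat subtraction gives Python's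
-- 'no-op when already long enough' exactly)
def pvLjust (l : List Char) (w : Nat) : List Char := l ++ List.replicate (w - l.length) ' '

-- ===== PORT A =====
-- textwrap.wrap(encoded, w+1, drop_whitespace=False) — hand port as chunks of size w+1;
-- exact on A's encoded string because every space in it is padding at the end of a chunk
def pvChunks (w : Nat) : List Char → List (List Char)
  | [] => []
  | c :: cs => (c :: cs.take w) :: pvChunks w (cs.drop w)
  termination_by l => l.length
  decreasing_by simp

def cipher_text (plain_text : String) : String :=
  let data := pvData plain_text
  let ln := data.length
  let col := pvCol ln
  let row := pvRow col ln
  let data := pvLjust data (col * row)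
  -- encoded = ''.join(data[i + j * col] for i in range(col) for j in range(row))
  -- (every index i + j*col is within the padded string, so getD never takes its default)
  let encoded := (List.range col).flatMap (fun i =>
    (List.range row).map (fun j => data.getD (i + j * col) ' '))
  String.ofList (PySem.Chars.join [' '] (pvChunks ((if row = 0 then 1 else row) - 1) encoded))

-- ===== PORT B =====
def cipher_text_alt (plain_text : String) : String :=
  let data := pvData plain_text
  let ln := data.length
  let col := pvCol ln
  let row := pvRow col ln
  let data := pvLjust data (col * row)
  -- rows = [data[k * col:(k + 1) * col] for k in range(row)]  (slices with in-range bounds)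
  let rows := (List.range row).map (fun k => (data.drop (k * col)).take col)
  -- ' '.join(''.join(r[i] for r in rows) for i in range(col))
  -- (every r has length col, so r[i] is in range and getD never takes its default)
  String.ofList (PySem.Chars.join [' ']
    ((List.range col).map (fun i => rows.map (fun r => r.getD i ' '))))

-- ===== PRECONDITION & SPEC =====
def Spec_cipher_text (plain_text : String) (out : String) : Prop := out = cipher_text_alt plain_text
instance (plain_text : String) (out : String) : Decidable (Spec_cipher_text plain_text out) := by unfold Spec_cipher_text; infer_instance

-- ===== CLAIM (what is proved, stated in full; the proofs are below) =====
def Claim_equal_cipher_text : Prop := ∀ (plain_text : String), Dom_cipher_text plain_text → Spec_cipher_text plain_text (cipher_text plain_text)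

-- ===== LEMMAS AND PROOFS =====

-- a column of B's grid is A's column of flat indices
theorem pv_col_eq (data : List Char) (col row i : Nat) (hi : i < col) :
    ((List.range row).map (fun k => (data.drop (k * col)).take col)).map (fun r => r.getD i ' ')
      = (List.range row).map (fun j => data.getD (i + j * col) ' ') := by
  rw [List.map_map]
  refine List.map_congr_left (fun k _ => ?_)
  simp only [Function.comp, List.getD]
  rw [List.getElem?_take_of_lt hi, List.getElem?_drop]
  ring_nf

-- chunking the flattening of equal-length (w+1) nonempty blocks recovers the blocks
theorem pvChunks_flatten (w : Nat) (L : List (List Char))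
    (h : ∀ x ∈ L, x.length = w + 1) : pvChunks w L.flatten = L := by
  induction L with
  | nil => rw [List.flatten_nil, pvChunks.eq_1]
  | cons x rest ih =>
    have hx : x.length = w + 1 := h x (by simp)
    obtain ⟨c, cs, rfl⟩ : ∃ c cs, x = c :: cs := by
      cases x with
      | nil => simp at hx
      | cons c cs => exact ⟨c, cs, rfl⟩
    have hcs : cs.length = w := by simpa using hx
    have hfl : ((c :: cs) :: rest).flatten = c :: (cs ++ rest.flatten) := by simp
    rw [hfl, pvChunks]
    rw [List.take_append_of_le_length (by omega), List.drop_append_of_le_length (by omega)]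
    have hdrop : cs.drop w = [] := List.drop_eq_nil_of_le (by omega)
    have htake : cs.take w = cs := List.take_of_length_le (by omega)
    simp [hdrop, htake, ih (fun x hx => h x (by simp [hx]))]

theorem pvCol_pos (ln : Nat) : 0 < pvCol ln := by
  unfold pvCol; split <;> omega

theorem pvRow_zero (col ln : Nat) (hc : 0 < col) (h : pvRow col ln = 0) : col = 1 := by
  unfold pvRow at h; split at h <;> omega

-- the heart of the equivalence, for any grid dimensions with col ≥ 1 (and col = 1 when row = 0)
theorem pv_core (data : List Char) (col row : Nat) (hrel : row = 0 → col = 1) :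
    String.ofList (PySem.Chars.join [' ']
        (pvChunks ((if row = 0 then 1 else row) - 1)
          ((List.range col).flatMap (fun i =>
            (List.range row).map (fun j => data.getD (i + j * col) ' ')))))
      = String.ofList (PySem.Chars.join [' ']
          ((List.range col).map (fun i =>
            ((List.range row).map (fun k => (data.drop (k * col)).take col)).map
              (fun r => r.getD i ' ')))) := by
  by_cases hrow : row = 0
  · -- empty ciphertext: col = 1 and both sides are ""
    have h1 := hrel hrow
    subst h1; subst hrow
    simp [pvChunks.eq_1, PySem.Chars.join_singleton]
  · -- row > 0: chunking A's flat encoded string recovers exactly B's columns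
    rw [List.flatMap_def, if_neg hrow]
    rw [pvChunks_flatten (row - 1) _ (by
      intro x hx
      simp only [List.mem_map] at hx
      obtain ⟨i, _, rfl⟩ := hx
      simp; omega)]
    have hmap : (List.range col).map (fun i =>
        ((List.range row).map (fun k => (data.drop (k * col)).take col)).map
          (fun r => r.getD i ' '))
      = (List.range col).map (fun i =>
          (List.range row).map (fun j => data.getD (i + j * col) ' ')) :=
      List.map_congr_left (fun i hi => pv_col_eq data col row i (List.mem_range.mp hi))
    rw [hmap]

theorem pv_main (plain_text : String) :
    cipher_text plain_text = cipher_text_alt plain_text := by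
  unfold cipher_text cipher_text_alt
  exact pv_core (pvLjust (pvData plain_text)
      (pvCol (pvData plain_text).length *
        pvRow (pvCol (pvData plain_text).length) (pvData plain_text).length))
    (pvCol (pvData plain_text).length)
    (pvRow (pvCol (pvData plain_text).length) (pvData plain_text).length)
    (pvRow_zero _ _ (pvCol_pos _))

-- ===== VERDICT (by name: the statement is the Claim_ definition above) =====
theorem cipher_text_spec : Claim_equal_cipher_text := by
  intro plain_text _
  unfold Spec_cipher_text
  exact pv_main plain_text
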